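-- pv_equiv track=rewrite | github.com/CRAFTSTARCN/OpenRender2 | PyShaderBulider/Util.py | resolve_param_one_line
-- ===== SOURCE A (Python) =====
-- def resolve_param_one_line(param : str):
--     warning_info = ""
--     type_name = param.split(' ')
--
--     p_type = type_name[0]
--     p_name = ""
--     found = False
--     for i in range(1, len(type_name)):
--         if len(type_name[i]) == 0:
--             continue
--         if found:
--             warning_info += "Warnning: ignore identifier {}, cause a name has provided before\n".format(type_name[i])
--         else:
--             found = True
--             p_name = type_name[i]
--
--         pass
--     if not found:
--         raise Exception("Missing param name for param type: {}}".format(p_type))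
--
--     return (p_type, p_name, warning_info)
-- ===== SOURCE B (Python) =====
-- def resolve_param_one_line(param: str):
--     # character-level scan: no split(); the type is the prefix before the first
--     # space, then a run-collecting state machine walks the remainder once.
--     i = param.find(' ')
--     if i < 0:
--         p_type, rest = param, ''
--     else:
--         p_type, rest = param[:i], param[i + 1:]
--     p_name = None
--     warning_info = ""
--     cur = ""
--     for ch in rest + ' ':          # trailing sentinel space flushes the last run
--         if ch != ' ':
--             cur += ch
--         elif cur:
--             if p_name is None:
--                 p_name = cur
--             else:
--                 warning_info += "Warnning: ignore identifier {}, cause a name has provided before\n".format(cur)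
--             cur = ""
--     if p_name is None:
--         raise Exception("Missing param name for param type: {}}".format(p_type))
--     return (p_type, p_name, warning_info)
-- ===== Notes on version B (the rewrite author's own statement) =====
-- stated objective: alternative
-- what changed: Replaces A's split(' ') followed by a flagged index loop over the token list with a split-free single character-level state machine: the type is the prefix before the first space (str.find) and one scan of the remainder collects maximal non-space runs, naming the first and warning on the rest.
-- outside the precondition, e.g. on resolve_param_one_line(' '): A raises ValueError, B raises ValueError
import Mathlib
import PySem

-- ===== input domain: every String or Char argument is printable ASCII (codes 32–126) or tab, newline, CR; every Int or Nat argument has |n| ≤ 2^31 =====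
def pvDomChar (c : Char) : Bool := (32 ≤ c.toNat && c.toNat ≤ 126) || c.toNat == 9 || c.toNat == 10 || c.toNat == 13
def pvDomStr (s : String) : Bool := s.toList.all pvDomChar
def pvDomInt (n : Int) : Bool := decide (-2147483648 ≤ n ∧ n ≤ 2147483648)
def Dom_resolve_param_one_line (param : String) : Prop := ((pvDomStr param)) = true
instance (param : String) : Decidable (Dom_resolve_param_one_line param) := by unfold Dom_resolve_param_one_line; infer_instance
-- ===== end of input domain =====

-- B replaces A's split-then-token-loop by a split-free character-level state machine (same
-- cost, a different traversal); on inputs with no non-empty token after the type both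
-- programs reach the same raise statement and raise there (excluded by Pre_).

-- the warning line both sources format for an ignored identifier
def pvWarn (t : List Char) : List Char :=
  "Warnning: ignore identifier ".toList ++ t ++ ", cause a name has provided before\n".toList

-- ===== PORT A =====
-- A's loop body: state (warning_info, p_name, found), one token at a time
def pvStepA (s : List Char × List Char × Bool) (t : List Char) : List Char × List Char × Bool :=
  if t.length = 0 then s
  else if s.2.2 = true then (s.1 ++ pvWarn t, s.2.1, s.2.2)
  else (s.1, t, true)

-- 'for i in range(1, len(type_name)): …'
def pvLoopA (type_name : List (List Char)) : List Char × List Char × Bool :=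
  (PySem.List.pyRange 1 (type_name.length : Int) 1).foldl
    (fun s i => pvStepA s (PySem.List.pyGetD type_name i [])) ([], [], false)

def resolve_param_one_line (param : String) : String × String × String :=
  (String.ofList (PySem.List.pyGetD (PySem.Chars.splitOn param.toList [' ']) 0 []),
   String.ofList (pvLoopA (PySem.Chars.splitOn param.toList [' '])).2.1,
   String.ofList (pvLoopA (PySem.Chars.splitOn param.toList [' '])).1)

-- ===== PORT B =====
-- Source B's per-character step: state (p_name?, warning_info, cur)
def pvStepB (s : Option (List Char) × List Char × List Char) (c : Char) :
    Option (List Char) × List Char × List Char :=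
  if c ≠ ' ' then (s.1, s.2.1, s.2.2 ++ [c])
  else if s.2.2 ≠ [] then
    match s.1 with
    | none   => (some s.2.2, s.2.1, [])
    | some n => (some n, s.2.1 ++ pvWarn s.2.2, [])
  else s

def resolve_param_one_line_alt (param : String) : String × String × String :=
  let i := PySem.Chars.find param.toList [' ']
  let p_type := if i < 0 then param.toList else PySem.Chars.slice param.toList none (some i)
  let rest := if i < 0 then [] else PySem.Chars.slice param.toList (some (i + 1)) none
  let s := (rest ++ [' ']).foldl pvStepB (none, [], [])
  match s.1 with
  | none      => (String.ofList p_type, "", "")   -- Source B raises here; Pre_ excludes these inputs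
  | some name => (String.ofList p_type, String.ofList name, String.ofList s.2.1)

-- ===== PRECONDITION & SPEC =====
-- Pre_ excludes exactly the inputs with no non-empty token after the first: there A raises
-- (and B raises identically, via the identical raise statement).
def Pre_resolve_param_one_line (param : String) : Prop :=
  ∃ t ∈ (PySem.Chars.splitOn param.toList [' ']).drop 1, t ≠ []
instance (param : String) : Decidable (Pre_resolve_param_one_line param) := by
  unfold Pre_resolve_param_one_line; infer_instance
def pvWitness_resolve_param_one_line : String := "int x"

def Spec_resolve_param_one_line (param : String) (out : String × String × String) : Prop :=
  out = resolve_param_one_line_alt param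
instance (param : String) (out : String × String × String) : Decidable (Spec_resolve_param_one_line param out) := by
  unfold Spec_resolve_param_one_line; infer_instance

-- ===== CLAIM (what is proved, stated in full; the proofs are below) =====
def Claim_equal_resolve_param_one_line : Prop := ∀ (param : String), Dom_resolve_param_one_line param → Pre_resolve_param_one_line param → Spec_resolve_param_one_line param (resolve_param_one_line param)

-- ===== LEMMAS AND PROOFS =====

-- reference splitter on ' ' (proof-only), and prepend-to-head
def pvSplitSp : List Char → List (List Char)
  | [] => [[]]
  | c :: cs => if c = ' ' then [] :: pvSplitSp cs
               else (c :: (pvSplitSp cs).headD []) :: (pvSplitSp cs).tail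

def pvPre (t : List Char) (l : List (List Char)) : List (List Char) :=
  (t ++ l.headD []) :: l.tail

theorem pvSplitSp_ne_nil (cs : List Char) : pvSplitSp cs ≠ [] := by
  cases cs with
  | nil => simp [pvSplitSp]
  | cons c cs => unfold pvSplitSp; split <;> simp

theorem pvPre_nil (l : List (List Char)) (h : l ≠ []) : pvPre [] l = l := by
  cases l with
  | nil => exact absurd rfl h
  | cons x xs => simp [pvPre]

theorem pvPre_pvPre (t u : List Char) (l : List (List Char)) :
    pvPre t (pvPre u l) = pvPre (t ++ u) l := by
  simp [pvPre]

theorem pvSplitSp_cons_space (cs : List Char) :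
    pvSplitSp (' ' :: cs) = [] :: pvSplitSp cs := by
  simp [pvSplitSp]

theorem pvSplitSp_cons (c : Char) (cs : List Char) (h : c ≠ ' ') :
    pvSplitSp (c :: cs) = pvPre [c] (pvSplitSp cs) := by
  simp [pvSplitSp, pvPre, h]

theorem pvSplitSp_append (t cs : List Char) (h : ' ' ∉ t) :
    pvSplitSp (t ++ cs) = pvPre t (pvSplitSp cs) := by
  induction t with
  | nil => simp [pvPre_nil _ (pvSplitSp_ne_nil cs)]
  | cons c t ih =>
      have hc : c ≠ ' ' := fun hq => h (hq ▸ List.mem_cons_self)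
      have ht : ' ' ∉ t := fun hq => h (List.mem_cons_of_mem _ hq)
      rw [List.cons_append, pvSplitSp_cons c _ hc, ih ht, pvPre_pvPre]
      rfl

-- splitOn with separator " " is the reference splitter
theorem pvGo_spec (fuel : Nat) (l cur : List Char) (acc : List (List Char))
    (h : l.length < fuel) :
    PySem.Chars.splitOn.go [' '] fuel l cur acc =
      acc.reverse ++ pvPre cur.reverse (pvSplitSp l) := by
  induction fuel generalizing l cur acc with
  | zero => omega
  | succ n ih =>
      cases l with
      | nil =>
          simp [PySem.Chars.splitOn.go, pvPre, pvSplitSp]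
      | cons c rest =>
          rw [PySem.Chars.splitOn.go]
          by_cases hc : c = ' '
          · subst hc
            simp only [List.isPrefixOf, BEq.rfl, Bool.true_and, if_true]
            rw [ih _ _ _ (by simpa using Nat.lt_of_succ_lt_succ (by simpa using h))]
            rw [pvSplitSp_cons_space]
            cases hsp : pvSplitSp rest with
            | nil => exact absurd hsp (pvSplitSp_ne_nil rest)
            | cons a as => simp [pvPre, hsp]
          · have : ([' '].isPrefixOf (c :: rest)) = false := by
              simp [List.isPrefixOf]; exact fun hq => absurd hq.symm hc
            simp only [this, Bool.false_eq_true, if_false]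
            rw [ih _ _ _ (by simpa using Nat.lt_of_succ_lt_succ (by simpa using h))]
            rw [pvSplitSp_cons c rest hc, pvPre_pvPre]
            simp

theorem pvSplitOn_eq (cs : List Char) :
    PySem.Chars.splitOn cs [' '] = pvSplitSp cs := by
  unfold PySem.Chars.splitOn
  rw [pvGo_spec _ _ _ _ (Nat.lt_succ_self _)]
  simpa using pvPre_nil _ (pvSplitSp_ne_nil cs)

-- token-level reading of Source B's state machine
def pvProcTok (s : Option (List Char) × List Char) (t : List Char) :
    Option (List Char) × List Char :=
  if t = [] then s
  else match s.1 with
  | none   => (some t, s.2)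
  | some n => (some n, s.2 ++ pvWarn t)

theorem pvStepB_space (nm : Option (List Char)) (w cur : List Char) :
    pvStepB (nm, w, cur) ' ' = ((pvProcTok (nm, w) cur).1, (pvProcTok (nm, w) cur).2, []) := by
  by_cases hcur : cur = []
  · subst hcur; simp [pvStepB, pvProcTok]
  · cases nm <;> simp [pvStepB, pvProcTok, hcur]

theorem pvFoldB (cs : List Char) (nm : Option (List Char)) (w cur : List Char) :
    (cs ++ [' ']).foldl pvStepB (nm, w, cur) =
      (((pvPre cur (pvSplitSp cs)).foldl pvProcTok (nm, w)).1,
       ((pvPre cur (pvSplitSp cs)).foldl pvProcTok (nm, w)).2, []) := by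
  induction cs generalizing nm w cur with
  | nil =>
      simp only [List.nil_append, List.foldl_cons, List.foldl_nil, pvStepB_space]
      simp [pvSplitSp, pvPre]
  | cons c cs ih =>
      by_cases hc : c = ' '
      · subst hc
        simp only [List.cons_append, List.foldl_cons, pvStepB_space]
        rw [ih]
        rw [pvSplitSp_cons_space, pvPre_nil _ (pvSplitSp_ne_nil cs)]
        simp [pvPre, List.foldl_cons]
      · have step : pvStepB (nm, w, cur) c = (nm, w, cur ++ [c]) := by
          simp [pvStepB, hc]
        simp only [List.cons_append, List.foldl_cons, step]
        rw [ih, pvSplitSp_cons c cs hc, pvPre_pvPre]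

-- fold of pvProcTok characterised by the non-empty tokens
theorem pvFoldTok_some (l : List (List Char)) (n w : List Char) :
    l.foldl pvProcTok (some n, w) =
      (some n, w ++ ((l.filter (· ≠ [])).map pvWarn).flatten) := by
  induction l generalizing w with
  | nil => simp
  | cons t ts ih =>
      by_cases ht : t = []
      · simp [pvProcTok, ht, ih]
      · simp [pvProcTok, ht, ih]

theorem pvFoldTok_none (l : List (List Char)) :
    l.foldl pvProcTok (none, []) =
      match l.filter (· ≠ []) with
      | [] => (none, [])
      | x :: xs => (some x, (xs.map pvWarn).flatten) := by
  induction l with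
  | nil => simp
  | cons t ts ih =>
      by_cases ht : t = []
      · simpa [pvProcTok, ht] using ih
      · simp [pvProcTok, ht, pvFoldTok_some]

-- A's loop characterisation (as in the token reading of A)
theorem pvFoldA_found (l : List (List Char)) (w n : List Char) :
    l.foldl pvStepA (w, n, true) =
      (w ++ ((l.filter (fun t => 0 < t.length)).map pvWarn).flatten, n, true) := by
  induction l generalizing w with
  | nil => simp
  | cons t ts ih =>
      by_cases h : t.length = 0
      · have ht : t = [] := List.length_eq_zero_iff.mp h
        simp [pvStepA, ht, ih]
      · have : 0 < t.length := Nat.pos_of_ne_zero h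
        simp [pvStepA, h, this, ih]

theorem pvFoldA_not_found (l : List (List Char)) (w n : List Char) :
    l.foldl pvStepA (w, n, false) =
      match l.filter (fun t => 0 < t.length) with
      | [] => (w, n, false)
      | x :: xs => (w ++ (xs.map pvWarn).flatten, x, true) := by
  induction l generalizing w n with
  | nil => simp
  | cons t ts ih =>
      by_cases h : t.length = 0
      · have ht : t = [] := List.length_eq_zero_iff.mp h
        simp [pvStepA, ht, ih]
      · have hp : 0 < t.length := Nat.pos_of_ne_zero h
        simp [pvStepA, h, hp, pvFoldA_found]

theorem pvLoopA_eq (type_name : List (List Char)) :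
    pvLoopA type_name =
      match (type_name.drop 1).filter (fun t => 0 < t.length) with
      | [] => ([], [], false)
      | x :: xs => ((xs.map pvWarn).flatten, x, true) := by
  unfold pvLoopA
  rw [PySem.List.foldl_pyRange_pyGetD' type_name [] pvStepA ([], [], false) (a := 1) (by norm_num)]
  rw [pvFoldA_not_found]
  norm_num

theorem pvFilter_len_eq (l : List (List Char)) :
    l.filter (fun t => 0 < t.length) = l.filter (· ≠ []) := by
  apply List.filter_congr
  intro t _
  simp [List.length_pos_iff]

-- find(' ') decomposition of the input
theorem pvPrefix_singleton (c : Char) (l : List Char) :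
    [c] <+: l ↔ l.head? = some c := by
  cases l with
  | nil => simp
  | cons x xs => simp [List.cons_prefix_cons, eq_comm]

-- ===== VERDICT (by name: the statement is the Claim_ definition above) =====
theorem resolve_param_one_line_spec : Claim_equal_resolve_param_one_line := by
  intro param _ hpre
  unfold Spec_resolve_param_one_line resolve_param_one_line resolve_param_one_line_alt
  obtain ⟨t, ht, htne⟩ := hpre
  rw [pvSplitOn_eq] at ht
  have hfind : 0 ≤ PySem.Chars.find param.toList [' '] := by
    by_contra hneg
    have h1 : PySem.Chars.find param.toList [' '] = -1 := by
      have := PySem.Chars.neg_one_le_find param.toList [' ']; omega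
    have h2 : ¬ [' '] <:+: param.toList := (PySem.Chars.find_eq_neg_one_iff _ _).mp h1
    have h3 : ' ' ∉ param.toList := fun hm => h2 ((List.singleton_infix_iff ' ' param.toList).mpr hm)
    have h4 : pvSplitSp param.toList = [param.toList] := by
      have h5 := pvSplitSp_append param.toList [] h3
      simpa [pvSplitSp, pvPre] using h5
    rw [h4] at ht; simp at ht
  obtain ⟨hpref, hmin⟩ := PySem.Chars.find_spec hfind
  set i := PySem.Chars.find param.toList [' '] with hi
  set n := i.toNat with hn
  have hhead : (param.toList.drop n).head? = some ' ' := (pvPrefix_singleton _ _).mp hpref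
  have hdropn : param.toList.drop n = ' ' :: param.toList.drop (n+1) := by
    cases hd : param.toList.drop n with
    | nil => rw [hd] at hhead; cases hhead
    | cons a as =>
        rw [hd] at hhead
        have ha : a = ' ' := by simpa using hhead
        have has : as = param.toList.drop (n+1) := by
          have htl : (param.toList.drop n).tail = param.toList.drop (n+1) := List.tail_drop
          rw [hd] at htl; simpa using htl
        rw [ha, has]
  have hnosp : ' ' ∉ param.toList.take n := by
    intro hm
    obtain ⟨j, hj, hjv⟩ := List.mem_iff_getElem.mp hm
    have hj2 := hj
    rw [List.length_take] at hj2
    have hjn : j < n := by omega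
    have hjlen : j < param.toList.length := by omega
    apply hmin j hjn
    rw [pvPrefix_singleton, List.head?_drop, List.getElem?_eq_getElem hjlen]
    rw [List.getElem_take] at hjv
    simp [hjv]
  have hdecomp : param.toList = param.toList.take n ++ ' ' :: param.toList.drop (n+1) := by
    conv_lhs => rw [← List.take_append_drop n param.toList, hdropn]
  have hsp : pvSplitSp param.toList = param.toList.take n :: pvSplitSp (param.toList.drop (n+1)) := by
    conv_lhs => rw [hdecomp]
    rw [pvSplitSp_append _ _ hnosp, pvSplitSp_cons_space]
    simp [pvPre]
  have hnotlt : ¬ i < 0 := by omega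
  have hslice1 : PySem.Chars.slice param.toList none (some i) = param.toList.take n :=
    PySem.List.slice_to param.toList hfind
  have hslice2 : PySem.Chars.slice param.toList (some (i + 1)) none = param.toList.drop (n+1) := by
    have h := PySem.List.slice_from param.toList (a := i + 1) (by omega)
    have htn : (i + 1).toNat = n + 1 := by omega
    rw [htn] at h
    exact h
  simp only [hnotlt, if_false, hslice1, hslice2]
  rw [pvFoldB]
  rw [pvPre_nil _ (pvSplitSp_ne_nil _), pvFoldTok_none]
  rw [pvSplitOn_eq, hsp, pvLoopA_eq]
  simp only [List.drop_succ_cons, List.drop_zero, pvFilter_len_eq]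
  have hfne : (pvSplitSp (param.toList.drop (n+1))).filter (· ≠ []) ≠ [] := by
    rw [hsp] at ht
    simp only [List.drop_succ_cons, List.drop_zero] at ht
    intro hnil
    exact htne (by simpa using List.filter_eq_nil_iff.mp hnil t ht)
  cases hf : (pvSplitSp (param.toList.drop (n+1))).filter (· ≠ []) with
  | nil => exact absurd hf hfne
  | cons x xs => simp [PySem.List.pyGetD_zero_cons]
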